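-- pv_equiv track=rewrite | github.com/kaizencycle/Mobius-Substrate | .github/scripts/epicon_intent_template.py | detect_scope
-- ===== SOURCE A (Python) =====
-- SCOPE_MAP = {
--     "docs": ["docs/", "epicon/", "README.md", "CHANGELOG.md", "LICENSE"],
--     "ci": [".github/", "ci/", "scripts/"],
--     "core": ["src/", "packages/", "apps/", "services/"],
--     "infra": ["infra/", "deploy/", "docker/", "monitoring/", "grafana/"],
--     "sentinels": ["sentinels/"],
--     "labs": ["labs/"],
--     "specs": ["specs/", "schemas/", "configs/"],
-- }
--
-- GOVERNANCE_PATTERNS = [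
--     "CODEOWNERS",
--     "PULL_REQUEST_TEMPLATE",
--     ".github/workflows/",
--     "SECURITY.md",
--     "GOVERNANCE.md",
--     "CHARTER.md",
--     "BYLAWS.md",
-- ]
--
-- def detect_scope(changed_files: list[str]) -> list[str]:
--     """
--     Detect scope categories from changed files.
--
--     Args:
--         changed_files: List of file paths changed in the PR
--
--     Returns:
--         List of detected scope labels
--     """
--     scopes = set()
--
--     for f in changed_files:
--         for scope, prefixes in SCOPE_MAP.items():
--             for prefix in prefixes:
--                 if f == prefix.rstrip("/") or f.startswith(prefix):
--                     scopes.add(scope)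
--                     break
--
--     # Check for governance-sensitive files
--     for f in changed_files:
--         for pattern in GOVERNANCE_PATTERNS:
--             if pattern in f:
--                 scopes.add("governance")
--                 break
--
--     # Check for code ownership changes
--     if any("CODEOWNERS" in f for f in changed_files):
--         scopes.add("code_ownership")
--
--     # Check for process changes
--     if any("PULL_REQUEST_TEMPLATE" in f for f in changed_files):
--         scopes.add("process")
--
--     return sorted(scopes) if scopes else ["feature"]
-- ===== SOURCE B (Python) =====
-- SCOPE_MAP = {
--     "docs": ["docs/", "epicon/", "README.md", "CHANGELOG.md", "LICENSE"],
--     "ci": [".github/", "ci/", "scripts/"],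
--     "core": ["src/", "packages/", "apps/", "services/"],
--     "infra": ["infra/", "deploy/", "docker/", "monitoring/", "grafana/"],
--     "sentinels": ["sentinels/"],
--     "labs": ["labs/"],
--     "specs": ["specs/", "schemas/", "configs/"],
-- }
--
-- GOVERNANCE_PATTERNS = [
--     "CODEOWNERS",
--     "PULL_REQUEST_TEMPLATE",
--     ".github/workflows/",
--     "SECURITY.md",
--     "GOVERNANCE.md",
--     "CHARTER.md",
--     "BYLAWS.md",
-- ]
--
-- # All labels the function can ever emit, in alphabetical order.
-- LABELS = ["ci", "code_ownership", "core", "docs", "governance",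
--           "infra", "labs", "process", "sentinels", "specs"]
--
--
-- # (bare, prefix) pairs with the rstrip done once, per scope.
-- SCOPE_RULES = {scope: [(p.rstrip("/"), p) for p in prefixes]
--                for scope, prefixes in SCOPE_MAP.items()}
--
--
-- def _label_applies(label: str, f: str) -> bool:
--     """Does file f justify this label?"""
--     if label == "governance":
--         return any(pat in f for pat in GOVERNANCE_PATTERNS)
--     if label == "code_ownership":
--         return "CODEOWNERS" in f
--     if label == "process":
--         return "PULL_REQUEST_TEMPLATE" in f
--     return any(f == bare or f.startswith(p) for bare, p in SCOPE_RULES[label])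
--
--
-- def detect_scope(changed_files: list[str]) -> list[str]:
--     # Label-driven: walk the fixed alphabetical label universe and keep each
--     # label some changed file justifies; no set, no sort of the result.
--     out = [lab for lab in LABELS
--            if any(_label_applies(lab, f) for f in changed_files)]
--     return out or ["feature"]
-- ===== Notes on version B (the rewrite author's own statement) =====
-- stated objective: alternative
-- what changed: A is file-driven, accumulating a set over four scans and sorting it; B is label-driven: it walks the fixed alphabetical label universe once and keeps each label some changed file justifies, so no set and no sort of the result is needed.
import Mathlib
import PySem

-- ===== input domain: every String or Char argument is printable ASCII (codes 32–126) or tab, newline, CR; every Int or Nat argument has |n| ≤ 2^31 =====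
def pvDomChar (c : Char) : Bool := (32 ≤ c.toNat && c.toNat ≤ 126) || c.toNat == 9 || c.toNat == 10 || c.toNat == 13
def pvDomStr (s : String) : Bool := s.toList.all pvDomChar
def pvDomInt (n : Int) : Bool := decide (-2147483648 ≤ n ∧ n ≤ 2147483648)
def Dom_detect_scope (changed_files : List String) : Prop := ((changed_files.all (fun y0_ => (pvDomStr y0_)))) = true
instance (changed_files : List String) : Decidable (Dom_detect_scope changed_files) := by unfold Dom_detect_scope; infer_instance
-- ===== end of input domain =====

-- A is file-driven (set accumulated over four scans, then sorted); B is label-driven: it filters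
-- the fixed alphabetical label universe by "some changed file justifies this label" (no set, no sort).

-- ===== PORT A =====
def pvSCOPE_MAP : List (String × List String) := [
  ("docs", ["docs/", "epicon/", "README.md", "CHANGELOG.md", "LICENSE"]),
  ("ci", [".github/", "ci/", "scripts/"]),
  ("core", ["src/", "packages/", "apps/", "services/"]),
  ("infra", ["infra/", "deploy/", "docker/", "monitoring/", "grafana/"]),
  ("sentinels", ["sentinels/"]),
  ("labs", ["labs/"]),
  ("specs", ["specs/", "schemas/", "configs/"])]

def pvGOV : List String := ["CODEOWNERS", "PULL_REQUEST_TEMPLATE", ".github/workflows/",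
  "SECURITY.md", "GOVERNANCE.md", "CHARTER.md", "BYLAWS.md"]

-- prefix.rstrip("/"): drop trailing '/' characters (hand-ported; exact for the one-character chars argument "/")
def pvRstripSlash (s : String) : String := String.ofList ((s.toList.reverse.dropWhile (fun c => c == '/')).reverse)

-- the condition  f == prefix.rstrip("/") or f.startswith(prefix)  (identical expression in both Pythons)
def pvMatch (f p : String) : Bool := (f == pvRstripSlash p) || PySem.Str.startswith f p

-- inner 'for prefix in prefixes: … break'
def aPrefixLoop (f scope : String) (scopes : PySem.Set String) : List String → PySem.Set String
  | [] => scopes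
  | p :: ps => if pvMatch f p then PySem.Set.add scopes scope else aPrefixLoop f scope scopes ps

-- 'for scope, prefixes in SCOPE_MAP.items()'
def aScopeLoop (f : String) (scopes : PySem.Set String) : List (String × List String) → PySem.Set String
  | [] => scopes
  | sp :: rest => aScopeLoop f (aPrefixLoop f sp.1 scopes sp.2) rest

-- 'for pattern in GOVERNANCE_PATTERNS: … break'
def aGovLoop (f : String) (scopes : PySem.Set String) : List String → PySem.Set String
  | [] => scopes
  | pat :: rest => if PySem.Str.isIn pat f then PySem.Set.add scopes "governance" else aGovLoop f scopes rest

def detect_scope (changed_files : List String) : List String :=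
  let s1 := changed_files.foldl (fun s f => aScopeLoop f s pvSCOPE_MAP) PySem.Set.empty
  let s2 := changed_files.foldl (fun s f => aGovLoop f s pvGOV) s1
  let s3 := if changed_files.any (fun f => PySem.Str.isIn "CODEOWNERS" f) then PySem.Set.add s2 "code_ownership" else s2
  let s4 := if changed_files.any (fun f => PySem.Str.isIn "PULL_REQUEST_TEMPLATE" f) then PySem.Set.add s3 "process" else s3
  if s4 = [] then ["feature"] else PySem.List.sorted s4 (fun x => x) false

-- ===== PORT B =====
-- LABELS: every label the function can emit, alphabetical (literal in Source B)
def pvLABELS : List String := ["ci", "code_ownership", "core", "docs", "governance",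
  "infra", "labs", "process", "sentinels", "specs"]

-- SCOPE_RULES: the rstrip done once per prefix (the dict comprehension of Source B)
def pvRULES : List (String × List (String × String)) :=
  pvSCOPE_MAP.map (fun sp => (sp.1, sp.2.map (fun p => (pvRstripSlash p, p))))

-- _label_applies(label, f); SCOPE_RULES (a dict) wrapped via Dict.mk; SCOPE_RULES[label] ported
-- as getD with default []: exact here because _label_applies is only called with labels of
-- LABELS, where the non-special labels are all keys of SCOPE_RULES (the default is never used).
def labelApplies (label f : String) : Bool :=
  if label == "governance" then pvGOV.any (fun pat => PySem.Str.isIn pat f)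
  else if label == "code_ownership" then PySem.Str.isIn "CODEOWNERS" f
  else if label == "process" then PySem.Str.isIn "PULL_REQUEST_TEMPLATE" f
  else (PySem.Dict.getD (PySem.Dict.mk pvRULES) label []).any
    (fun pr => (f == pr.1) || PySem.Str.startswith f pr.2)

def detect_scope_alt (changed_files : List String) : List String :=
  let out := pvLABELS.filter (fun lab => changed_files.any (fun f => labelApplies lab f))
  if out = [] then ["feature"] else out

-- ===== PRECONDITION & SPEC =====
def Spec_detect_scope (changed_files : List String) (out : List String) : Prop := out = detect_scope_alt changed_files
instance (changed_files : List String) (out : List String) : Decidable (Spec_detect_scope changed_files out) := by unfold Spec_detect_scope; infer_instance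

-- ===== CLAIM =====
def Claim_equal_detect_scope : Prop := ∀ (changed_files : List String), Dom_detect_scope changed_files → Spec_detect_scope changed_files (detect_scope changed_files)

-- ===== LEMMAS AND PROOFS =====

lemma mem_addIf (c : Bool) (s : PySem.Set String) (y x : String) :
    x ∈ (if c then PySem.Set.add s y else s) ↔ x ∈ s ∨ (x = y ∧ c = true) := by
  cases c <;> simp [PySem.Set.mem_add]

lemma nodup_addIf (c : Bool) (s : PySem.Set String) (y : String) (hs : s.Nodup) :
    (if c then PySem.Set.add s y else s).Nodup := by
  cases c
  · simpa
  · simpa using PySem.Set.nodup_add s y hs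

lemma mem_aPrefixLoop (f scope : String) (s : PySem.Set String) (ps : List String) (x : String) :
    x ∈ aPrefixLoop f scope s ps ↔ x ∈ s ∨ (x = scope ∧ ps.any (pvMatch f) = true) := by
  induction ps with
  | nil => simp [aPrefixLoop]
  | cons p ps ih =>
    by_cases h : pvMatch f p
    · simp [aPrefixLoop, h, PySem.Set.mem_add]
    · simp [aPrefixLoop, h, ih]

lemma nodup_aPrefixLoop (f scope : String) (s : PySem.Set String) (ps : List String)
    (hs : s.Nodup) : (aPrefixLoop f scope s ps).Nodup := by
  induction ps with
  | nil => simpa [aPrefixLoop]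
  | cons p ps ih =>
    by_cases h : pvMatch f p
    · simpa [aPrefixLoop, h] using PySem.Set.nodup_add s scope hs
    · simpa [aPrefixLoop, h] using ih

lemma mem_aScopeLoop (f : String) (s : PySem.Set String) (m : List (String × List String)) (x : String) :
    x ∈ aScopeLoop f s m ↔ x ∈ s ∨ ∃ sp ∈ m, x = sp.1 ∧ sp.2.any (pvMatch f) = true := by
  induction m generalizing s with
  | nil => simp [aScopeLoop]
  | cons sp rest ih =>
    simp only [aScopeLoop, ih, mem_aPrefixLoop, List.mem_cons]
    constructor
    · rintro ((h | h) | ⟨q, hq, h⟩)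
      · exact Or.inl h
      · exact Or.inr ⟨sp, Or.inl rfl, h⟩
      · exact Or.inr ⟨q, Or.inr hq, h⟩
    · rintro (h | ⟨q, (rfl | hq), h⟩)
      · exact Or.inl (Or.inl h)
      · exact Or.inl (Or.inr h)
      · exact Or.inr ⟨q, hq, h⟩

lemma nodup_aScopeLoop (f : String) (s : PySem.Set String) (m : List (String × List String))
    (hs : s.Nodup) : (aScopeLoop f s m).Nodup := by
  induction m generalizing s with
  | nil => simpa [aScopeLoop]
  | cons sp rest ih => exact ih _ (nodup_aPrefixLoop _ _ _ _ hs)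

lemma mem_aGovLoop (f : String) (s : PySem.Set String) (pats : List String) (x : String) :
    x ∈ aGovLoop f s pats ↔ x ∈ s ∨ (x = "governance" ∧ pats.any (fun pat => PySem.Str.isIn pat f) = true) := by
  induction pats with
  | nil => simp [aGovLoop]
  | cons pat rest ih =>
    by_cases h : PySem.Chars.isIn pat.toList f.toList
    · simp [aGovLoop, h, PySem.Set.mem_add]
    · simp [aGovLoop, h, ih]

lemma nodup_aGovLoop (f : String) (s : PySem.Set String) (pats : List String)
    (hs : s.Nodup) : (aGovLoop f s pats).Nodup := by
  induction pats with
  | nil => simpa [aGovLoop]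
  | cons pat rest ih =>
    by_cases h : PySem.Chars.isIn pat.toList f.toList
    · simpa [aGovLoop, h] using PySem.Set.nodup_add s "governance" hs
    · simpa [aGovLoop, h] using ih

-- generic: a fold whose step adds exactly the labels P · f
lemma mem_foldl_step (step : PySem.Set String → String → PySem.Set String) (P : String → String → Prop)
    (h : ∀ s f x, x ∈ step s f ↔ x ∈ s ∨ P x f) (files : List String) :
    ∀ (s : PySem.Set String) (x : String), x ∈ files.foldl step s ↔ x ∈ s ∨ ∃ f ∈ files, P x f := by
  induction files with
  | nil => simp
  | cons f fs ih =>
    intro s x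
    simp only [List.foldl_cons, ih, h, List.mem_cons]
    constructor
    · rintro ((h1 | h1) | ⟨g, hg, h1⟩)
      · exact Or.inl h1
      · exact Or.inr ⟨f, Or.inl rfl, h1⟩
      · exact Or.inr ⟨g, Or.inr hg, h1⟩
    · rintro (h1 | ⟨g, (rfl | hg), h1⟩)
      · exact Or.inl (Or.inl h1)
      · exact Or.inl (Or.inr h1)
      · exact Or.inr ⟨g, hg, h1⟩

lemma nodup_foldl_step (step : PySem.Set String → String → PySem.Set String)
    (h : ∀ s f, List.Nodup s → List.Nodup (step s f)) (files : List String) :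
    ∀ (s : PySem.Set String), List.Nodup s → List.Nodup (files.foldl step s) := by
  induction files with
  | nil => exact fun s hs => hs
  | cons f fs ih => exact fun s hs => ih _ (h _ _ hs)

-- what A adds in total for a file f
def pvQ (x f : String) : Prop :=
  (∃ sp ∈ pvSCOPE_MAP, x = sp.1 ∧ sp.2.any (pvMatch f) = true) ∨
  (x = "governance" ∧ pvGOV.any (fun pat => PySem.Str.isIn pat f) = true) ∨
  (x = "code_ownership" ∧ PySem.Str.isIn "CODEOWNERS" f = true) ∨
  (x = "process" ∧ PySem.Str.isIn "PULL_REQUEST_TEMPLATE" f = true)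

-- A's accumulated set (the value of 'scopes' just before the return)
def pvASet (files : List String) : PySem.Set String :=
  let s1 := files.foldl (fun s f => aScopeLoop f s pvSCOPE_MAP) PySem.Set.empty
  let s2 := files.foldl (fun s f => aGovLoop f s pvGOV) s1
  let s3 := if files.any (fun f => PySem.Str.isIn "CODEOWNERS" f) then PySem.Set.add s2 "code_ownership" else s2
  if files.any (fun f => PySem.Str.isIn "PULL_REQUEST_TEMPLATE" f) then PySem.Set.add s3 "process" else s3

lemma mem_pvASet (files : List String) (x : String) :
    x ∈ pvASet files ↔ ∃ f ∈ files, pvQ x f := by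
  have hfold : ∀ y, y ∈ files.foldl (fun s f => aGovLoop f s pvGOV)
      (files.foldl (fun s f => aScopeLoop f s pvSCOPE_MAP) PySem.Set.empty) ↔
      (∃ f ∈ files, ∃ sp ∈ pvSCOPE_MAP, y = sp.1 ∧ sp.2.any (pvMatch f) = true) ∨
      (∃ f ∈ files, y = "governance" ∧ pvGOV.any (fun pat => PySem.Str.isIn pat f) = true) := by
    intro y
    rw [mem_foldl_step (fun s f => aGovLoop f s pvGOV)
      (fun y f => y = "governance" ∧ pvGOV.any (fun pat => PySem.Str.isIn pat f) = true)
      (fun s f y => mem_aGovLoop f s pvGOV y) files,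
      mem_foldl_step (fun s f => aScopeLoop f s pvSCOPE_MAP)
      (fun y f => ∃ sp ∈ pvSCOPE_MAP, y = sp.1 ∧ sp.2.any (pvMatch f) = true)
      (fun s f y => mem_aScopeLoop f s pvSCOPE_MAP y) files]
    simp only [PySem.Set.empty, List.not_mem_nil, false_or]
  have hstep : x ∈ pvASet files ↔
      (∃ f ∈ files, ∃ sp ∈ pvSCOPE_MAP, x = sp.1 ∧ sp.2.any (pvMatch f) = true) ∨
      (∃ f ∈ files, x = "governance" ∧ pvGOV.any (fun pat => PySem.Str.isIn pat f) = true) ∨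
      (x = "code_ownership" ∧ files.any (fun f => PySem.Str.isIn "CODEOWNERS" f) = true) ∨
      (x = "process" ∧ files.any (fun f => PySem.Str.isIn "PULL_REQUEST_TEMPLATE" f) = true) := by
    unfold pvASet
    rw [mem_addIf, mem_addIf, hfold x]
    simp only [or_assoc]
  rw [hstep]
  unfold pvQ
  simp only [List.any_eq_true]
  constructor
  · rintro (⟨f, hf, h⟩ | ⟨f, hf, h⟩ | ⟨hx, f, hf, h⟩ | ⟨hx, f, hf, h⟩)
    · exact ⟨f, hf, Or.inl h⟩
    · exact ⟨f, hf, Or.inr (Or.inl h)⟩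
    · exact ⟨f, hf, Or.inr (Or.inr (Or.inl ⟨hx, h⟩))⟩
    · exact ⟨f, hf, Or.inr (Or.inr (Or.inr ⟨hx, h⟩))⟩
  · rintro ⟨f, hf, (h | h | ⟨hx, h⟩ | ⟨hx, h⟩)⟩
    · exact Or.inl ⟨f, hf, h⟩
    · exact Or.inr (Or.inl ⟨f, hf, h⟩)
    · exact Or.inr (Or.inr (Or.inl ⟨hx, f, hf, h⟩))
    · exact Or.inr (Or.inr (Or.inr ⟨hx, f, hf, h⟩))

lemma nodup_pvASet (files : List String) : (pvASet files).Nodup := by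
  unfold pvASet
  have n1 := nodup_foldl_step (fun s f => aScopeLoop f s pvSCOPE_MAP)
    (fun s f hs => nodup_aScopeLoop f s pvSCOPE_MAP hs) files PySem.Set.empty (by simp [PySem.Set.empty])
  have n2 := nodup_foldl_step (fun s f => aGovLoop f s pvGOV)
    (fun s f hs => nodup_aGovLoop f s pvGOV hs) files _ n1
  exact nodup_addIf _ _ _ (nodup_addIf _ _ _ n2)

-- For a label of the universe, B's per-file test names exactly A's per-file additions
lemma applies_iff_pvQ (lab f : String) (hlab : lab ∈ pvLABELS) :
    labelApplies lab f = true ↔ pvQ lab f := by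
  fin_cases hlab <;>
    simp [labelApplies, pvQ, pvSCOPE_MAP, pvRULES, pvMatch, PySem.Dict.getD, PySem.Dict.get?]

-- Anything A ever adds is in the label universe
lemma pvQ_mem_labels (x f : String) : pvQ x f → x ∈ pvLABELS := by
  rintro (⟨sp, hsp, rfl, _⟩ | ⟨rfl, _⟩ | ⟨rfl, _⟩ | ⟨rfl, _⟩)
  · fin_cases hsp <;> simp [pvLABELS]
  all_goals simp [pvLABELS]

-- B's output list
def pvBOut (files : List String) : List String :=
  pvLABELS.filter (fun lab => files.any (fun f => labelApplies lab f))

lemma mem_pvBOut (files : List String) (x : String) :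
    x ∈ pvBOut files ↔ ∃ f ∈ files, pvQ x f := by
  unfold pvBOut
  rw [List.mem_filter]
  constructor
  · rintro ⟨hx, h⟩
    rw [List.any_eq_true] at h
    obtain ⟨f, hf, ha⟩ := h
    exact ⟨f, hf, (applies_iff_pvQ x f hx).1 ha⟩
  · rintro ⟨f, hf, hq⟩
    have hx := pvQ_mem_labels x f hq
    exact ⟨hx, List.any_eq_true.2 ⟨f, hf, (applies_iff_pvQ x f hx).2 hq⟩⟩

lemma perm_AB (files : List String) : (pvBOut files).Perm (pvASet files) := by
  refine (List.perm_ext_iff_of_nodup ?_ (nodup_pvASet files)).2 ?_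
  · exact List.Nodup.filter _ (by decide : pvLABELS.Nodup)
  · intro x; rw [mem_pvBOut, mem_pvASet]

lemma pairwise_pvBOut (files : List String) : (pvBOut files).Pairwise (fun a b => a < b) := by
  have h : pvLABELS.Pairwise (fun a b : String => a.toList < b.toList) := by decide
  exact List.Pairwise.filter _ (h.imp (fun {a b} hl => String.lt_iff_toList_lt.mpr hl))

-- ===== VERDICT =====
theorem detect_scope_spec : Claim_equal_detect_scope := by
  intro files _
  show detect_scope files = detect_scope_alt files
  have hperm := perm_AB files
  have hA : detect_scope files =
      (if pvASet files = [] then ["feature"] else PySem.List.sorted (pvASet files) (fun x => x) false) := rfl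
  have hB : detect_scope_alt files =
      (if pvBOut files = [] then ["feature"] else pvBOut files) := rfl
  rw [hA, hB]
  by_cases hBe : pvBOut files = []
  · rw [if_pos hBe, if_pos (by rw [hBe] at hperm; exact hperm.symm.eq_nil)]
  · have hAe : ¬ pvASet files = [] := by
      intro h; rw [h] at hperm; exact hBe hperm.eq_nil
    rw [if_neg hAe, if_neg hBe]
    exact PySem.List.sorted_eq_of_perm_of_pairwise_lt (pvASet files) (pvBOut files)
      (fun x => x) hperm (pairwise_pvBOut files)
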